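-- pv_equiv track=rewrite | github.com/AdamZhouSE/pythonHomework | Code/CodeRecords/2617/60885/266149.py | bit_to_count
-- ===== SOURCE A (Python) =====
-- def bit_to_count(line):
--     counter = []
--     count = 1
--     for c in line:
--         if c == '1':
--             counter.append(count)
--             count = 1
--         elif c == '0':
--             count += 1
--     counter.append(count)
--     return counter
-- ===== SOURCE B (Python) =====
-- def bit_to_count(line):
--     # Split on '1' (one segment per gap), then count the '0's in each segment.
--     return [1 + seg.count('0') for seg in line.split('1')]
-- ===== Notes on version B (the rewrite author's own statement) =====
-- stated objective: faster
-- what changed: Replaces A's per-character Python state machine (running counter reset at each separator) by a split-then-count comprehension whose segment splitting and zero-counting run in C string primitives.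
import Mathlib
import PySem

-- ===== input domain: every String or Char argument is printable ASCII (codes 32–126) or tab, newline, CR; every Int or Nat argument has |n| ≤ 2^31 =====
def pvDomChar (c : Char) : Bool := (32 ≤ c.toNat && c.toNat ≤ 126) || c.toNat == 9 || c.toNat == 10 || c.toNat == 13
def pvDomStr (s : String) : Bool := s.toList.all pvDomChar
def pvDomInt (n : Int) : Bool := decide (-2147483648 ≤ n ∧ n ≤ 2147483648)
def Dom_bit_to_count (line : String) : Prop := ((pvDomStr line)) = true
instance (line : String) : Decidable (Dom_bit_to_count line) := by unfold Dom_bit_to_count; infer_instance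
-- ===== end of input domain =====

-- B replaces A's char-by-char state machine with an idiomatic split-on-'1' then count-'0'-per-segment comprehension.


-- ===== PORT A =====
def bit_to_count (line : String) : List Int :=
  let st := line.toList.foldl
    (fun (s : List Int × Int) c =>
      if c == '1' then (s.1 ++ [s.2], 1)
      else if c == '0' then (s.1, s.2 + 1)
      else s)
    ([], 1)
  st.1 ++ [st.2]

-- ===== PORT B =====
-- line.split('1') → PySem.Chars.splitOn (the sep ≠ "" form of str.split); seg.count('0') → PySem.Chars.count
def bit_to_count_alt (line : String) : List Int :=
  (PySem.Chars.splitOn line.toList ['1']).map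
    (fun seg => 1 + (PySem.Chars.count seg ['0'] : Int))

-- ===== PRECONDITION & SPEC =====
def Spec_bit_to_count (line : String) (out : List Int) : Prop := out = bit_to_count_alt line
instance (line : String) (out : List Int) : Decidable (Spec_bit_to_count line out) := by unfold Spec_bit_to_count; infer_instance

-- ===== CLAIM (what is proved, stated in full; the proofs are below) =====
def Claim_equal_bit_to_count : Prop := ∀ (line : String), Dom_bit_to_count line → Spec_bit_to_count line (bit_to_count line)

-- ===== LEMMAS AND PROOFS =====

-- Reference splitter: segments of cs between occurrences of d.
def pvSegs (d : Char) : List Char → List (List Char)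
  | [] => [[]]
  | c :: rest => if c = d then [] :: pvSegs d rest else (pvSegs d rest).modifyHead (c :: ·)

theorem pvSegs_ne_nil (d : Char) (cs : List Char) : pvSegs d cs ≠ [] := by
  cases cs with
  | nil => simp [pvSegs]
  | cons c rest =>
    simp only [pvSegs]
    split_ifs
    · simp
    · cases h : pvSegs d rest with
      | nil => exact absurd h (pvSegs_ne_nil d rest)
      | cons a l => simp

theorem count_go_single (d : Char) :
    ∀ (l : List Char) (fuel acc : Nat), l.length ≤ fuel →
      PySem.Chars.count.go [d] fuel l acc = acc + l.count d := by
  intro l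
  induction l with
  | nil => intro fuel acc _; cases fuel <;> simp [PySem.Chars.count.go]
  | cons c t ih =>
    intro fuel acc hle
    cases fuel with
    | zero => simp at hle
    | succ f =>
      have hle' : t.length ≤ f := by simp at hle; omega
      by_cases hc : d = c
      · subst hc
        simp only [PySem.Chars.count.go, List.isPrefixOf, beq_self_eq_true, Bool.true_and,
          if_true, List.length_cons, List.length_nil, List.drop_succ_cons, List.drop_zero]
        rw [ih f (acc + 1) hle']
        simp
        omega
      · have hdc : (d == c) = false := by simp [hc]
        simp only [PySem.Chars.count.go, List.isPrefixOf, hdc, Bool.false_and,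
          Bool.false_eq_true, if_false]
        rw [ih f acc hle']
        simp [Ne.symm hc]

theorem count_single (s : List Char) (d : Char) :
    PySem.Chars.count s [d] = s.count d := by
  simp [PySem.Chars.count, count_go_single d s s.length 0 le_rfl]

theorem splitOn_go_single (d : Char) :
    ∀ (l : List Char) (fuel : Nat) (cur : List Char) (acc : List (List Char)),
      l.length ≤ fuel →
      PySem.Chars.splitOn.go [d] fuel l cur acc
        = acc.reverse ++ (pvSegs d l).modifyHead (cur.reverse ++ ·) := by
  intro l
  induction l with
  | nil => intro fuel cur acc _; cases fuel <;> simp [PySem.Chars.splitOn.go, pvSegs]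
  | cons c t ih =>
    intro fuel cur acc hle
    cases fuel with
    | zero => simp at hle
    | succ f =>
      have hle' : t.length ≤ f := by simp at hle; omega
      obtain ⟨h, tl, hh⟩ := List.exists_cons_of_ne_nil (pvSegs_ne_nil d t)
      by_cases hc : d = c
      · subst hc
        simp only [PySem.Chars.splitOn.go, List.isPrefixOf, beq_self_eq_true, Bool.true_and,
          if_true, List.length_cons, List.length_nil, List.drop_succ_cons, List.drop_zero]
        rw [ih f [] (cur.reverse :: acc) hle']
        simp [pvSegs, hh]
      · have hdc : (d == c) = false := by simp [hc]
        simp only [PySem.Chars.splitOn.go, List.isPrefixOf, hdc, Bool.false_and,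
          Bool.false_eq_true, if_false]
        rw [ih f (c :: cur) acc hle']
        simp [pvSegs, Ne.symm hc, hh]

theorem splitOn_single (s : List Char) (d : Char) :
    PySem.Chars.splitOn s [d] = pvSegs d s := by
  rw [PySem.Chars.splitOn, splitOn_go_single d s (s.length + 1) [] [] (by omega)]
  obtain ⟨h, tl, hh⟩ := List.exists_cons_of_ne_nil (pvSegs_ne_nil d s)
  simp [hh]

theorem foldA (cs : List Char) :
    ∀ (counter : List Int) (count : Int),
      (cs.foldl (fun (s : List Int × Int) c =>
          if c == '1' then (s.1 ++ [s.2], 1)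
          else if c == '0' then (s.1, s.2 + 1)
          else s) (counter, count)).1
        ++ [(cs.foldl (fun (s : List Int × Int) c =>
          if c == '1' then (s.1 ++ [s.2], 1)
          else if c == '0' then (s.1, s.2 + 1)
          else s) (counter, count)).2]
      = counter ++ (count + ((pvSegs '1' cs).headI.count '0' : Int))
          :: ((pvSegs '1' cs).tail.map (fun seg => 1 + (seg.count '0' : Int))) := by
  induction cs with
  | nil => intro counter count; simp [pvSegs]
  | cons c t ih =>
    intro counter count
    obtain ⟨h, tl, hh⟩ := List.exists_cons_of_ne_nil (pvSegs_ne_nil '1' t)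
    by_cases h1 : c = '1'
    · subst h1
      rw [List.foldl_cons, if_pos (by decide)]
      rw [ih (counter ++ [count]) 1]
      simp [pvSegs, hh]
    · by_cases h0 : c = '0'
      · subst h0
        rw [List.foldl_cons, if_neg (by decide), if_pos (by decide)]
        rw [ih counter (count + 1)]
        simp [pvSegs, hh]
        omega
      · rw [List.foldl_cons, if_neg (by simp [h1]), if_neg (by simp [h0])]
        rw [ih counter count]
        simp [pvSegs, h1, hh, h0]

-- ===== VERDICT (by name: the statement is the Claim_ definition above) =====
theorem bit_to_count_spec : Claim_equal_bit_to_count := by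
  intro line _
  unfold Spec_bit_to_count bit_to_count bit_to_count_alt
  rw [splitOn_single]
  obtain ⟨h, tl, hh⟩ := List.exists_cons_of_ne_nil (pvSegs_ne_nil '1' line.toList)
  simp only [foldA line.toList [] 1, hh, List.map_cons, List.nil_append,
    List.headI, List.tail, count_single]
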